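-- pv_equiv track=rewrite | github.com/510o/AyahSearch | searcher/search.py | number_search
-- ===== SOURCE A (Python) =====
-- def number_search(nums, keys, quran_text):
--     sura = nums[0]
--
--     if len(nums) > 1:
--         aya = nums[1]
--         return [
--             (key, text)
--             for key, text in zip(keys, quran_text)
--             if key[0] == sura and key[1] == aya
--         ]
--
--     return [
--         (key, text)
--         for key, text in zip(keys, quran_text)
--         if key[0] == sura and key[1] == 1
--     ]
-- ===== SOURCE B (Python) =====
-- def number_search(nums, keys, quran_text):
--     target = (nums[0], nums[1] if len(nums) > 1 else 1)
--     groups = {}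
--     for key, text in zip(keys, quran_text):
--         groups[key] = groups.get(key, []) + [text]
--     return [(target, t) for t in groups.get(target, [])]
-- ===== Notes on version B (the rewrite author's own statement) =====
-- stated objective: alternative
-- what changed: B replaces A's two per-case filter comprehensions with one grouping pass that builds a dict from key to its texts and then looks up the single target (sura, aya) key, rebuilding the pairs from the lookup.
import Mathlib
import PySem

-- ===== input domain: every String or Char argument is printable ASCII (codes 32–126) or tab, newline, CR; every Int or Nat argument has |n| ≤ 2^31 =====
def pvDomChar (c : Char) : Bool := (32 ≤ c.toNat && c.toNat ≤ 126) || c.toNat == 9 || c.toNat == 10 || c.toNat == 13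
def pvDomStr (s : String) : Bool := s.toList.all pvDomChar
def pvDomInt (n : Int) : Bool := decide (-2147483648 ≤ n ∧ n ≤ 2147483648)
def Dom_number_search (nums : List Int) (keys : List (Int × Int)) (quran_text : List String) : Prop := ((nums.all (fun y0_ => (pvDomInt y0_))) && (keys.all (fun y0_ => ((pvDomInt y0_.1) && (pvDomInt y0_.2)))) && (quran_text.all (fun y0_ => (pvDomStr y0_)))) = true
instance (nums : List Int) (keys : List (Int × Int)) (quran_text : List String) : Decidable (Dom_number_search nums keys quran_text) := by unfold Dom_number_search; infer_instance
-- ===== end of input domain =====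

-- B groups the zipped (key, text) pairs into a dict key → texts in one pass and looks up the
-- single target key, instead of A's per-case filter comprehensions (objective: alternative).

-- ===== PORT A =====
def number_search (nums : List Int) (keys : List (Int × Int)) (quran_text : List String) : List ((Int × Int) × String) :=
  match PySem.List.pyGet? nums 0 with
  | none => []          -- IndexError: excluded by Pre_
  | some sura =>
    if nums.length > 1 then
      match PySem.List.pyGet? nums 1 with
      | none => []      -- unreachable (length > 1)
      | some aya =>
        (keys.zip quran_text).filter (fun p => p.1.1 == sura && p.1.2 == aya)
    else
      (keys.zip quran_text).filter (fun p => p.1.1 == sura && p.1.2 == 1)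

-- ===== PORT B =====
def number_search_alt (nums : List Int) (keys : List (Int × Int)) (quran_text : List String) : List ((Int × Int) × String) :=
  match PySem.List.pyGet? nums 0 with
  | none => []          -- IndexError: excluded by Pre_
  | some sura =>
    let aya : Int :=
      if nums.length > 1 then
        match PySem.List.pyGet? nums 1 with
        | none => 0     -- unreachable (length > 1)
        | some a => a
      else 1
    let target : Int × Int := (sura, aya)
    let groups : PySem.Dict (Int × Int) (List String) :=
      (keys.zip quran_text).foldl (fun d p => d.modify p.1 [] (· ++ [p.2])) PySem.Dict.empty
    (groups.getD target []).map (fun t => (target, t))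

-- ===== PRECONDITION & SPEC =====
-- Pre_ excludes only nums = [], on which A (and B) raise IndexError at nums[0].
def Pre_number_search (nums : List Int) (keys : List (Int × Int)) (quran_text : List String) : Prop := nums ≠ []
instance (nums : List Int) (keys : List (Int × Int)) (quran_text : List String) : Decidable (Pre_number_search nums keys quran_text) := by unfold Pre_number_search; infer_instance
def pvWitness_number_search : List Int × (List (Int × Int)) × List String := ([2, 1], [(1, 1), (2, 1), (2, 2)], ["a", "b", "c"])

def Spec_number_search (nums : List Int) (keys : List (Int × Int)) (quran_text : List String) (out : List ((Int × Int) × String)) : Prop := out = number_search_alt nums keys quran_text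
instance (nums : List Int) (keys : List (Int × Int)) (quran_text : List String) (out : List ((Int × Int) × String)) : Decidable (Spec_number_search nums keys quran_text out) := by unfold Spec_number_search; infer_instance

-- ===== CLAIM (what is proved, stated in full; the proofs are below) =====
def Claim_equal_number_search : Prop := ∀ (nums : List Int) (keys : List (Int × Int)) (quran_text : List String), Dom_number_search nums keys quran_text → Pre_number_search nums keys quran_text → Spec_number_search nums keys quran_text (number_search nums keys quran_text)

-- ===== LEMMAS AND PROOFS =====

-- filtering on key == c and re-pairing with c is the identity on the filtered list
theorem pv_filter_repair (c : Int × Int) (l : List ((Int × Int) × String)) :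
    (l.filter (fun p => p.1 == c)).map (fun p => (c, p.2)) = l.filter (fun p => p.1 == c) := by
  induction l with
  | nil => rfl
  | cons p rest ih =>
    by_cases h : p.1 == c
    · have hc : p.1 = c := beq_iff_eq.mp h
      subst hc
      simp [List.filter_cons, h, ih]
    · simp [List.filter_cons, h, ih]

-- the grouping dict's entry at c is exactly the filter on key == c
theorem pv_group_filter (c : Int × Int) (l : List ((Int × Int) × String)) :
    ((l.foldl (fun d p => d.modify p.1 [] (· ++ [p.2])) PySem.Dict.empty).getD c []).map (fun t => (c, t))
      = l.filter (fun p => p.1 == c) := by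
  rw [PySem.Dict.getD_foldl_modify_append, PySem.Dict.getD_empty]
  simp only [List.nil_append, List.map_map]
  exact pv_filter_repair c l

theorem pv_pred_eq (s a : Int) (p : (Int × Int) × String) :
    (p.1.1 == s && p.1.2 == a) = (p.1 == (s, a)) := by
  obtain ⟨⟨x, y⟩, t⟩ := p
  rfl

-- ===== VERDICT (by name: the statement is the Claim_ definition above) =====
theorem number_search_spec : Claim_equal_number_search := by
  intro nums keys qt _ hpre
  unfold Spec_number_search number_search number_search_alt
  cases nums with
  | nil => exact absurd rfl hpre
  | cons n0 rest =>
    have h0 : PySem.List.pyGet? (n0 :: rest) 0 = some n0 := by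
      simp [PySem.List.pyGet?, PySem.List.pyIdx?]
    rw [h0]
    by_cases hlen : (n0 :: rest).length > 1
    · cases rest with
      | nil => simp at hlen
      | cons n1 rest' =>
        have h1 : PySem.List.pyGet? (n0 :: n1 :: rest') 1 = some n1 := by
          simp [PySem.List.pyGet?, PySem.List.pyIdx?]
        simp only [hlen, if_true, h1]
        rw [pv_group_filter (n0, n1)]
        exact List.filter_congr (fun p _ => pv_pred_eq n0 n1 p)
    · simp only [hlen, if_false]
      rw [pv_group_filter (n0, 1)]
      exact List.filter_congr (fun p _ => pv_pred_eq n0 1 p)
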